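-- pv_equiv track=rewrite | github.com/gillggx/aiops-platform | fastapi_backend_service/app/services/pipeline_builder/blocks/weco_rules.py | _k_of_n_runs
-- ===== SOURCE A (Python) =====
-- def _k_of_n_runs(mask: list[bool], k: int, n: int) -> list[int]:
--     """Return end-indices where within the last n points, at least k are True."""
--     hits: list[int] = []
--     if n > len(mask):
--         return hits
--     for end in range(n - 1, len(mask)):
--         window = mask[end - n + 1 : end + 1]
--         if sum(window) >= k:
--             hits.append(end)
--     return hits
-- ===== SOURCE B (Python) =====
-- def _k_of_n_runs(mask: list[bool], k: int, n: int) -> list[int]: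
--     """Return end-indices where within the last n points, at least k are True."""
--     if n > len(mask):
--         return []
--     pref = [0]
--     s = 0
--     for v in mask:
--         s += v
--         pref.append(s)
--     return [end for end in range(n - 1, len(mask)) if pref[end + 1] - pref[end + 1 - n] >= k]
-- ===== Notes on version B (the rewrite author's own statement) =====
-- stated objective: faster
-- what changed: B precomputes one prefix-sum list and tests each window by a single subtraction, replacing A's per-end-index slice-and-sum inner pass.
-- outside the precondition, e.g. on _k_of_n_runs([True], 0, -1): A returns [-2, -1, 0], B raises IndexError
import Mathlib
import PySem

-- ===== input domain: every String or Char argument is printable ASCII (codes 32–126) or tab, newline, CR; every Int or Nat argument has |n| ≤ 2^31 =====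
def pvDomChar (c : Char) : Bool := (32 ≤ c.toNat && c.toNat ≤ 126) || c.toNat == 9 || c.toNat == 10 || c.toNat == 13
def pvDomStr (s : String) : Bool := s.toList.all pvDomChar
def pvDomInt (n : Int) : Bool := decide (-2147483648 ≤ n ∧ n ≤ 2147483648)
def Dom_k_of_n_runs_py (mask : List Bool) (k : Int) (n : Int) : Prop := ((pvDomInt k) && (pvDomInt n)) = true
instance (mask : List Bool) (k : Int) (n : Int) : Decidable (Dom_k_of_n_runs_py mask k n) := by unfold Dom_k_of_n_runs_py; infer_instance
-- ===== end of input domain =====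

-- B replaces A's per-end slice-and-sum by one precomputed prefix-sum list and a
-- subtraction per window (objective: faster, asymptotically fewer operations).

-- ===== PORT A =====
def k_of_n_runs_py (mask : List Bool) (k : Int) (n : Int) : List Int :=
  if n > (mask.length : Int) then []
  else
    (PySem.List.pyRange (n - 1) (mask.length : Int) 1).foldl
      (fun hits e =>
        let window := PySem.List.slice mask (some (e - n + 1)) (some (e + 1))
        if k ≤ (window.map (fun b => if b then (1 : Int) else 0)).sum then hits ++ [e]
        else hits)
      []

-- ===== PORT B =====
def k_of_n_runs_py_alt (mask : List Bool) (k : Int) (n : Int) : List Int :=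
  if n > (mask.length : Int) then []
  else
    let ps := mask.foldl
      (fun (acc : List Int × Int) v =>
        let s := acc.2 + (if v then (1 : Int) else 0)
        (acc.1 ++ [s], s))
      ([0], 0)
    (PySem.List.pyRange (n - 1) (mask.length : Int) 1).filter
      (fun e => decide (k ≤ PySem.List.pyGetD ps.1 (e + 1) 0 - PySem.List.pyGetD ps.1 (e + 1 - n) 0))

-- ===== PRECONDITION & SPEC =====
-- Pre_ excludes n < 0, where A's window slice wraps around via Python's negative
-- indices and returns accidental negative pseudo-indices, while B's prefix-sum
-- indexing raises IndexError there.
def Pre_k_of_n_runs_py (mask : List Bool) (k : Int) (n : Int) : Prop := 0 ≤ n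
instance (mask : List Bool) (k : Int) (n : Int) : Decidable (Pre_k_of_n_runs_py mask k n) := by unfold Pre_k_of_n_runs_py; infer_instance
def pvWitness_k_of_n_runs_py : List Bool × Int × Int := ([true, false, true], 1, 2)
def Spec_k_of_n_runs_py (mask : List Bool) (k : Int) (n : Int) (out : List Int) : Prop := out = k_of_n_runs_py_alt mask k n
instance (mask : List Bool) (k : Int) (n : Int) (out : List Int) : Decidable (Spec_k_of_n_runs_py mask k n out) := by unfold Spec_k_of_n_runs_py; infer_instance

-- ===== CLAIM (what is proved, stated in full; the proofs are below) =====
def Claim_equal_k_of_n_runs_py : Prop := ∀ (mask : List Bool) (k : Int) (n : Int), Dom_k_of_n_runs_py mask k n → Pre_k_of_n_runs_py mask k n → Spec_k_of_n_runs_py mask k n (k_of_n_runs_py mask k n)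

-- ===== LEMMAS AND PROOFS =====

/-- Count of `true`s as the 0/1 sum both ports compute. -/
def pvCnt (l : List Bool) : Int := (l.map (fun b => if b then (1 : Int) else 0)).sum

theorem pvCnt_append (l₁ l₂ : List Bool) : pvCnt (l₁ ++ l₂) = pvCnt l₁ + pvCnt l₂ := by
  simp [pvCnt]

/-- Characterisation of B's prefix-sum accumulator. -/
theorem pref_spec (mask : List Bool) (p : List Int) (s : Int) :
    (mask.foldl
      (fun (acc : List Int × Int) v =>
        let t := acc.2 + (if v then (1 : Int) else 0)
        (acc.1 ++ [t], t))
      (p, s)).1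
    = p ++ (List.range mask.length).map (fun i => s + pvCnt (mask.take (i + 1))) := by
  induction mask generalizing p s with
  | nil => simp
  | cons v tl ih =>
      simp only [List.foldl_cons]
      rw [ih]
      simp only [List.length_cons, List.range_succ_eq_map, List.map_cons, List.map_map]
      simp [pvCnt, List.append_assoc]
      intro a _
      ring

theorem pref_get (mask : List Bool) (i : Int) (h0 : 0 ≤ i) (hL : i ≤ (mask.length : Int)) :
    PySem.List.pyGetD
      ((mask.foldl
        (fun (acc : List Int × Int) v =>
          let t := acc.2 + (if v then (1 : Int) else 0)
          (acc.1 ++ [t], t))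
        (([0] : List Int), 0)).1) i 0
    = pvCnt (mask.take i.toNat) := by
  rw [pref_spec]
  lift i to ℕ using h0 with j
  rw [PySem.List.pyGetD_natCast]
  rw [Int.toNat_natCast]
  cases j with
  | zero => simp [pvCnt]
  | succ m =>
      have hm : m < mask.length := by exact_mod_cast (by omega : ((m : Int) + 1) ≤ (mask.length : Int))
      simp [List.getD, hm]

/-- The window's 0/1-sum equals the prefix-sum difference B computes. -/
theorem window_sum (mask : List Bool) (n e : Int) (h0 : 0 ≤ n)
    (he1 : n - 1 ≤ e) (he2 : e < (mask.length : Int)) :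
    ((PySem.List.slice mask (some (e - n + 1)) (some (e + 1))).map
        (fun b => if b then (1 : Int) else 0)).sum
    = PySem.List.pyGetD
        ((mask.foldl
          (fun (acc : List Int × Int) v =>
            let t := acc.2 + (if v then (1 : Int) else 0)
            (acc.1 ++ [t], t))
          (([0] : List Int), 0)).1) (e + 1) 0
      - PySem.List.pyGetD
        ((mask.foldl
          (fun (acc : List Int × Int) v =>
            let t := acc.2 + (if v then (1 : Int) else 0)
            (acc.1 ++ [t], t))
          (([0] : List Int), 0)).1) (e + 1 - n) 0 := by
  rw [pref_get mask (e + 1) (by omega) (by omega),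
      pref_get mask (e + 1 - n) (by omega) (by omega)]
  rw [PySem.List.slice_toNat mask (by omega) (by omega)]
  have hrw : e - n + 1 = e + 1 - n := by ring
  rw [hrw]
  have hab : (e + 1 - n).toNat ≤ (e + 1).toNat := by omega
  have hsplit : mask.take (e + 1).toNat
      = mask.take (e + 1 - n).toNat
        ++ (mask.drop (e + 1 - n).toNat).take ((e + 1).toNat - (e + 1 - n).toNat) := by
    have h : (e + 1).toNat = (e + 1 - n).toNat + ((e + 1).toNat - (e + 1 - n).toNat) := by omega
    rw [h, List.take_add]
    congr 2
    omega
  rw [hsplit, pvCnt_append]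
  simp [pvCnt]

theorem k_of_n_runs_py_spec : Claim_equal_k_of_n_runs_py := by
  intro mask k n _ hpre
  unfold Spec_k_of_n_runs_py k_of_n_runs_py k_of_n_runs_py_alt
  by_cases hn : n > (mask.length : Int)
  · rw [if_pos hn, if_pos hn]
  · rw [if_neg hn, if_neg hn]
    simp only []
    rw [PySem.List.foldl_append_ite_eq_filter]
    rw [List.nil_append]
    apply List.filter_congr
    intro e he
    rw [PySem.List.mem_pyRange_one] at he
    have hw := window_sum mask n e hpre (by omega) (by omega)
    simp only [hw]
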